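-- pv_equiv track=rewrite | github.com/ronnyshalev/EchoInference_local | EchoCardiFunction.py | get_sorted_boundary
-- ===== SOURCE A (Python) =====
-- def get_sorted_boundary(full_contour, intersect_points):  ####new and Modified Oct 2021
--     '''
--     get the boundary without intersection sorted
--     inputs are lists
--     '''
--     min_ele = intersect_points[0]
--     for ele in intersect_points:
--         if ele[0] < min_ele[0]:
--             min_ele = ele
--     min_ele_ind = full_contour.index(min_ele)
--     num_control_points = len(full_contour) - len(intersect_points)
--     double_contour_LA_list = full_contour + full_contour
--     contour_sorted = double_contour_LA_list[min_ele_ind  : min_ele_ind + num_control_points + 2]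
--     return contour_sorted
-- ===== SOURCE B (Python) =====
-- def get_sorted_boundary(full_contour, intersect_points):
--     def cyc_take(lst, k):
--         # take k points from the cycle generated by lst
--         if k <= 0:
--             return []
--         if k <= len(lst):
--             return lst[:k]
--         return lst + cyc_take(lst, k - len(lst))
--     anchor = sorted(intersect_points, key=lambda e: e[0])[0]
--     i = full_contour.index(anchor)
--     rotated = full_contour[i:] + full_contour[:i]
--     return cyc_take(rotated, len(full_contour) - len(intersect_points) + 2)
-- ===== Notes on version B (the rewrite author's own statement) =====
-- stated objective: alternative
-- what changed: B picks the anchor as the head of a stable sort by x-coordinate instead of A's running-minimum scan, rotates the contour to start at the anchor, and extracts the window with a recursive cyclic-take helper instead of slicing a doubled copy of the contour.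
-- intended difference: On inputs with so many intersect points that count = len(full_contour)-len(intersect_points)+2 is negative enough to make the slice stop index start+count negative (while still above -2n), A's negative stop wraps around the doubled contour and returns an accidental nonempty chunk, while B returns the empty list, the intended result when no control points remain. — e.g. on get_sorted_boundary([(0, 0), (1, 1)], [(0, 0), (0, 0), (0, 0), (0, 0), (0, 0)]): A returns [(0, 0), (1, 1), (0, 0)], B returns []
import Mathlib
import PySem

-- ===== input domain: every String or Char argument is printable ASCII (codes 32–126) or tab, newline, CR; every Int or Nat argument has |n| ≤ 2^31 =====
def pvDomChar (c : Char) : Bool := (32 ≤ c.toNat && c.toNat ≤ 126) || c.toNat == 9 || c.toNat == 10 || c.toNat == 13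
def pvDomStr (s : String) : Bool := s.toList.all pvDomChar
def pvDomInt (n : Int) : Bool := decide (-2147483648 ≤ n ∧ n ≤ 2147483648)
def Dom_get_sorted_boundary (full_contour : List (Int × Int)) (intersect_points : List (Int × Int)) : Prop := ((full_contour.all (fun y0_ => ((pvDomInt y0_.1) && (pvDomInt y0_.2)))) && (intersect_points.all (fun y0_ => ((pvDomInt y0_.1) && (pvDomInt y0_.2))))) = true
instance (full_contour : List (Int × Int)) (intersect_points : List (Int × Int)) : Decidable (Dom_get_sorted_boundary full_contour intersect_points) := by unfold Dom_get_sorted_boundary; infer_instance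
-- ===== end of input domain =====

-- B picks the anchor as the head of a stable sort by x-coordinate (instead of A's
-- running-minimum scan), rotates the contour at the anchor, and extracts the window
-- with a recursive cyclic-take helper instead of slicing a doubled copy of the contour.

-- ===== PORT A =====
-- A's running-minimum loop body ('if ele[0] < min_ele[0]: min_ele = ele')
def pvScanStep (m e : Int × Int) : Int × Int := if e.1 < m.1 then e else m

def get_sorted_boundary (full_contour : List (Int × Int)) (intersect_points : List (Int × Int)) : List (Int × Int) :=
  match PySem.List.pyGet? intersect_points 0 with
  | none => []  -- IndexError on empty intersect_points (outside Pre_)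
  | some e0 =>
    let min_ele := intersect_points.foldl pvScanStep e0
    match PySem.List.index? full_contour min_ele with
    | none => []  -- ValueError from full_contour.index (outside Pre_)
    | some min_ele_ind =>
      let num_control_points : Int := (full_contour.length : Int) - (intersect_points.length : Int)
      let double_contour_LA_list := full_contour ++ full_contour
      PySem.List.slice double_contour_LA_list (some (min_ele_ind : Int))
        (some ((min_ele_ind : Int) + num_control_points + 2))

-- ===== PORT B =====
-- B's recursive helper 'cyc_take(lst, k)': take k points from the cycle generated by lst.
-- Structural recursion on a fuel counter (k.toNat + 1 suffices: k drops by len(lst) ≥ 1 per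
-- step); fuel = 0 only when Python's recursion would never return (lst = []), a totalisation guard.
def pvCycTakeGo (lst : List (Int × Int)) : Int → Nat → List (Int × Int)
  | _, 0 => []
  | k, fuel + 1 =>
    if k ≤ 0 then []
    else if k ≤ lst.length then PySem.List.slice lst none (some k)
    else lst ++ pvCycTakeGo lst (k - lst.length) fuel

def pvCycTake (lst : List (Int × Int)) (k : Int) : List (Int × Int) :=
  pvCycTakeGo lst k (k.toNat + 1)

def get_sorted_boundary_alt (full_contour : List (Int × Int)) (intersect_points : List (Int × Int)) : List (Int × Int) :=
  match PySem.List.pyGet? (PySem.List.sorted intersect_points (fun e => e.1) false) 0 with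
  | none => []  -- IndexError: sorted(...)[0] on empty intersect_points (outside Pre_)
  | some anchor =>
    match PySem.List.index? full_contour anchor with
    | none => []  -- ValueError from full_contour.index (outside Pre_)
    | some i =>
      let rotated := PySem.List.slice full_contour (some (i : Int)) none ++
                     PySem.List.slice full_contour none (some (i : Int))
      pvCycTake rotated ((full_contour.length : Int) - (intersect_points.length : Int) + 2)

-- ===== PRECONDITION & SPEC =====
-- first element of ip whose x-coordinate is minimal (what A's scan and B's sorted-head select)
def pvFirstMin (ip : List (Int × Int)) : Option (Int × Int) :=
  ip.find? fun e => ip.all (e.1 ≤ ·.1)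

-- Pre_ excludes exactly the inputs where A raises: empty intersect_points (IndexError)
-- and a minimal intersect point absent from full_contour (ValueError).
def Pre_get_sorted_boundary (full_contour : List (Int × Int)) (intersect_points : List (Int × Int)) : Prop :=
  ∃ k ∈ intersect_points, pvFirstMin intersect_points = some k ∧ k ∈ full_contour
instance (full_contour : List (Int × Int)) (intersect_points : List (Int × Int)) : Decidable (Pre_get_sorted_boundary full_contour intersect_points) := by unfold Pre_get_sorted_boundary; infer_instance

def pvWitness_get_sorted_boundary : (List (Int × Int)) × (List (Int × Int)) :=
  ([(0, 0), (1, 1)], [(0, 0)])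

-- On inputs with so many intersect points that count = len(full_contour)-len(intersect_points)+2
-- makes the slice stop start+count negative (yet above -2n), A's negative stop wraps around the
-- doubled contour and returns an accidental nonempty chunk; B returns the intended empty list.
def D_get_sorted_boundary (full_contour : List (Int × Int)) (intersect_points : List (Int × Int)) : Prop :=
  (((pvFirstMin intersect_points).bind (List.idxOf? · full_contour)).getD 0 : Int)
      + full_contour.length - intersect_points.length + 2 < 0 ∧
    (intersect_points.length : Int) < 3 * full_contour.length + 2
instance (full_contour : List (Int × Int)) (intersect_points : List (Int × Int)) : Decidable (D_get_sorted_boundary full_contour intersect_points) := by unfold D_get_sorted_boundary; infer_instance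

def Spec_get_sorted_boundary (full_contour : List (Int × Int)) (intersect_points : List (Int × Int)) (out : List (Int × Int)) : Prop := ¬ D_get_sorted_boundary full_contour intersect_points → out = get_sorted_boundary_alt full_contour intersect_points
instance (full_contour : List (Int × Int)) (intersect_points : List (Int × Int)) (out : List (Int × Int)) : Decidable (Spec_get_sorted_boundary full_contour intersect_points out) := by unfold Spec_get_sorted_boundary; infer_instance

def pvDiffWitness_get_sorted_boundary : (List (Int × Int)) × (List (Int × Int)) :=
  ([(0, 0), (1, 1)], [(0, 0), (0, 0), (0, 0), (0, 0), (0, 0)])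
def pvDiffWitnessOut_get_sorted_boundary : (List (Int × Int)) × (List (Int × Int)) :=
  ([(0, 0), (1, 1), (0, 0)], [])

-- ===== CLAIM (what is proved, stated in full; the proofs are below) =====
def Claim_unchanged_get_sorted_boundary : Prop := ∀ (full_contour : List (Int × Int)) (intersect_points : List (Int × Int)), Dom_get_sorted_boundary full_contour intersect_points → Pre_get_sorted_boundary full_contour intersect_points → Spec_get_sorted_boundary full_contour intersect_points (get_sorted_boundary full_contour intersect_points)
def Claim_changed_get_sorted_boundary : Prop := Dom_get_sorted_boundary (pvDiffWitness_get_sorted_boundary.1) (pvDiffWitness_get_sorted_boundary.2) ∧ Pre_get_sorted_boundary (pvDiffWitness_get_sorted_boundary.1) (pvDiffWitness_get_sorted_boundary.2) ∧ D_get_sorted_boundary (pvDiffWitness_get_sorted_boundary.1) (pvDiffWitness_get_sorted_boundary.2) ∧ get_sorted_boundary (pvDiffWitness_get_sorted_boundary.1) (pvDiffWitness_get_sorted_boundary.2) = pvDiffWitnessOut_get_sorted_boundary.1 ∧ get_sorted_boundary_alt (pvDiffWitness_get_sorted_boundary.1) (pvDiffWitness_get_sorted_boundary.2) = pvDiffWitnessOut_get_sorted_boundary.2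 ∧ pvDiffWitnessOut_get_sorted_boundary.1 ≠ pvDiffWitnessOut_get_sorted_boundary.2
def Claim_exact_get_sorted_boundary : Prop := ∀ (full_contour : List (Int × Int)) (intersect_points : List (Int × Int)), Dom_get_sorted_boundary full_contour intersect_points → Pre_get_sorted_boundary full_contour intersect_points → D_get_sorted_boundary full_contour intersect_points → get_sorted_boundary full_contour intersect_points ≠ get_sorted_boundary_alt full_contour intersect_points

-- ===== LEMMAS AND PROOFS =====

-- running minimum of the x-coordinates, A-style fold seeded with the head
def pvM (h : Int × Int) (t : List (Int × Int)) : Int :=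
  t.foldl (fun a e => min a e.1) h.1

theorem pvM_cons (h x : Int × Int) (t : List (Int × Int)) :
    pvM h (x :: t) = pvM (if x.1 < h.1 then x else h) t := by
  simp [pvM]; split <;> rename_i hlt
  · congr 1; omega
  · congr 1; omega

theorem pvM_le (t : List (Int × Int)) (h : Int × Int) :
    ∀ e ∈ h :: t, pvM h t ≤ e.1 := by
  induction t generalizing h with
  | nil => intro e he; simp at he; simp [pvM, he]
  | cons x t ih =>
    intro e he
    rw [pvM_cons]
    have hy1 : (if x.1 < h.1 then x else h).1 ≤ h.1 ∧ (if x.1 < h.1 then x else h).1 ≤ x.1 := by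
      constructor <;> (split <;> omega)
    have hhead := ih (if x.1 < h.1 then x else h) _ (List.mem_cons_self ..)
    rcases List.mem_cons.mp he with heq | he'
    · rw [heq]; omega
    · rcases List.mem_cons.mp he' with heq | he''
      · rw [heq]; omega
      · exact ih _ e (List.mem_cons_of_mem _ he'')

theorem pvM_mem (t : List (Int × Int)) (h : Int × Int) :
    ∃ e ∈ h :: t, e.1 = pvM h t := by
  induction t generalizing h with
  | nil => exact ⟨h, by simp [pvM]⟩
  | cons x t ih =>
    rw [pvM_cons]
    obtain ⟨e, he, hev⟩ := ih (if x.1 < h.1 then x else h)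
    rcases List.mem_cons.mp he with heq | he'
    · exact ⟨_, by split <;> simp, heq ▸ hev⟩
    · exact ⟨e, List.mem_cons_of_mem _ (List.mem_cons_of_mem _ he'), hev⟩

-- A's running-minimum scan picks the first element of h::t with minimal x-coordinate
theorem scan_eq_find (t : List (Int × Int)) (h : Int × Int) :
    (h :: t).find? (fun e => e.1 == pvM h t) = some (t.foldl pvScanStep h) := by
  induction t generalizing h with
  | nil => simp [pvM]
  | cons x t ih =>
    rw [pvM_cons]
    by_cases hlt : x.1 < h.1 <;> simp only [hlt, ite_true, ite_false]
    · have hle := pvM_le t x x (List.mem_cons_self ..)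
      rw [List.find?_cons_of_neg (by simp; omega)]
      rw [List.foldl_cons, show pvScanStep h x = x by simp [pvScanStep, hlt]]
      exact ih x
    · rw [List.foldl_cons, show pvScanStep h x = h by simp [pvScanStep, hlt]]
      have hmle := pvM_le t h h (List.mem_cons_self ..)
      by_cases hh : h.1 = pvM h t
      · have h2 := ih h
        rw [List.find?_cons_of_pos (by simp [hh])] at h2
        rw [List.find?_cons_of_pos (by simp [hh]), h2]
      · rw [List.find?_cons_of_neg (by simp [hh]),
            List.find?_cons_of_neg (by simp; omega)]
        have h2 := ih h
        rw [List.find?_cons_of_neg (by simp [hh])] at h2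
        exact h2

theorem find?_congr_mem {α : Type} (l : List α) (p q : α → Bool)
    (hpq : ∀ x ∈ l, p x = q x) : l.find? p = l.find? q := by
  induction l with
  | nil => rfl
  | cons x t ih =>
    have hx := hpq x (List.mem_cons_self ..)
    by_cases hp : p x = true
    · rw [List.find?_cons_of_pos hp, List.find?_cons_of_pos (hx ▸ hp)]
    · rw [List.find?_cons_of_neg hp, List.find?_cons_of_neg (hx ▸ hp),
          ih (fun y hy => hpq y (List.mem_cons_of_mem _ hy))]

theorem pvFirstMin_eq_scan (t : List (Int × Int)) (h : Int × Int) :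
    pvFirstMin (h :: t) = some (t.foldl pvScanStep h) := by
  rw [pvFirstMin, find?_congr_mem (h :: t) _ (fun e => e.1 == pvM h t), scan_eq_find]
  intro e he
  have hle := pvM_le t h
  rw [Bool.eq_iff_iff]
  simp only [List.all_cons, Bool.and_eq_true, decide_eq_true_eq, List.all_eq_true, beq_iff_eq]
  constructor
  · rintro ⟨h1, h2⟩
    obtain ⟨f, hf, hfv⟩ := pvM_mem t h
    have hme := hle e he
    rcases List.mem_cons.mp hf with heq | hf'
    · have : e.1 ≤ f.1 := heq ▸ h1
      omega
    · have := h2 f hf'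
      omega
  · intro hm
    refine ⟨?_, fun f hf => ?_⟩
    · have := hle h (List.mem_cons_self ..); omega
    · have := hle f (List.mem_cons_of_mem _ hf); omega

-- B's stable insertion sort keeps a cons list whose head is A's running minimum
theorem foldl_insertBy_head (l : List (Int × Int)) (h : Int × Int) (acc : List (Int × Int)) :
    ∃ acc', l.foldl (fun acc x => PySem.List.insertBy (fun a b => decide (a.1 < b.1)) x acc) (h :: acc)
      = l.foldl pvScanStep h :: acc' := by
  induction l generalizing h acc with
  | nil => exact ⟨acc, rfl⟩
  | cons x l ih =>
    rw [List.foldl_cons, List.foldl_cons]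
    by_cases hlt : x.1 < h.1
    · have : PySem.List.insertBy (fun a b => decide (a.1 < b.1)) x (h :: acc) = x :: h :: acc := by
        simp [PySem.List.insertBy, hlt]
      rw [this, show pvScanStep h x = x by simp [pvScanStep, hlt]]
      exact ih x (h :: acc)
    · have : PySem.List.insertBy (fun a b => decide (a.1 < b.1)) x (h :: acc)
          = h :: PySem.List.insertBy (fun a b => decide (a.1 < b.1)) x acc := by
        simp [PySem.List.insertBy, hlt]
      rw [this, show pvScanStep h x = h by simp [pvScanStep, hlt]]
      exact ih h _

-- head of sorted(ip, key = fst) = A's running minimum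
theorem sorted_head (t : List (Int × Int)) (h : Int × Int) :
    PySem.List.pyGet? (PySem.List.sorted (h :: t) (fun e => e.1) false) 0
      = some (t.foldl pvScanStep h) := by
  rw [PySem.List.sorted_eq_foldl_insertBy]
  rw [List.foldl_cons]
  have h1 : PySem.List.insertBy (fun a b => decide ((fun e : Int × Int => e.1) a < (fun e : Int × Int => e.1) b)) h ([] : List (Int × Int)) = [h] := by
    simp [PySem.List.insertBy]
  rw [h1]
  obtain ⟨acc', hacc⟩ := foldl_insertBy_head t h []
  rw [hacc, PySem.List.pyGet?_zero_cons]

-- unfolding equation of the fuel recursion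
theorem pvCycTakeGo_succ (lst : List (Int × Int)) (k : Int) (f : Nat) :
    pvCycTakeGo lst k (f + 1) =
      if k ≤ 0 then []
      else if k ≤ lst.length then PySem.List.slice lst none (some k)
      else lst ++ pvCycTakeGo lst (k - lst.length) f := rfl

-- cyclic take from the rotated contour = A's slice of the doubled contour (Nat count ≤ n+1)
theorem cyc_eq_slice (fc : List (Int × Int)) (idx cn : Nat)
    (hidx : idx < fc.length) (hcn : cn ≤ fc.length + 1) :
    PySem.List.slice (fc ++ fc) (some (idx : Int)) (some ((idx : Int) + (cn : Int)))
      = pvCycTake (fc.drop idx ++ fc.take idx) ((cn : Int)) := by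
  have hdrop : (fc ++ fc).drop idx = fc.drop idx ++ fc := by
    rw [List.drop_append]
    congr 1
    rw [show idx - fc.length = 0 by omega, List.drop_zero]
  have hA : PySem.List.slice (fc ++ fc) (some (idx : Int)) (some ((idx : Int) + (cn : Int)))
      = (fc.drop idx ++ fc).take cn := by
    rw [PySem.List.slice_toNat _ (by positivity) (by positivity),
        show ((idx : Int) + (cn : Int)).toNat = idx + cn by omega, Int.toNat_natCast,
        show idx + cn - idx = cn by omega, hdrop]
  have hrotlen : (fc.drop idx ++ fc.take idx).length = fc.length := by
    simp; omega
  rw [hA, pvCycTake, Int.toNat_natCast, pvCycTakeGo_succ, hrotlen]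
  by_cases h0 : cn = 0
  · subst h0; simp
  rw [if_neg (by omega)]
  by_cases hle : cn ≤ fc.length
  · -- one chunk: take cn of the rotation
    rw [if_pos (by omega), PySem.List.slice_to _ (by positivity), Int.toNat_natCast]
    rw [List.take_append, List.take_append]
    congr 1
    rw [List.take_take]
    congr 1
    have : (fc.drop idx).length = fc.length - idx := by simp
    rw [this]
    omega
  · -- cn = n + 1: the rotation plus its first point
    have hcn1 : cn = fc.length + 1 := by omega
    subst hcn1
    rw [if_neg (by omega),
        show ((((fc.length + 1 : Nat)) : Int) - (fc.length : Int)) = (1 : Int) by omega,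
        pvCycTakeGo_succ, hrotlen, if_neg (by omega), if_pos (by omega),
        PySem.List.slice_to _ (by omega)]
    have hdl : (fc.drop idx).length = fc.length - idx := by simp
    have htake1 : (fc.drop idx ++ fc.take idx).take (Int.toNat 1) = (fc.drop idx).take 1 := by
      rw [List.take_append, show Int.toNat 1 = 1 from rfl,
          show 1 - (fc.drop idx).length = 0 by rw [hdl]; omega,
          List.take_zero, List.append_nil]
    rw [htake1]
    have hdc : fc.drop idx = fc[idx] :: fc.drop (idx + 1) := (List.getElem_cons_drop hidx).symm
    rw [List.take_append]
    rw [show fc.length + 1 - (fc.drop idx).length = idx + 1 by omega]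
    rw [List.take_of_length_le (by omega), List.append_assoc]
    congr 1
    rw [List.take_add_one, List.getElem?_eq_getElem hidx,
        show List.take 1 (List.drop idx fc) = [fc[idx]] by rw [hdc]; rfl,
        Option.toList_some]

-- both ports locate the same anchor point and the same start index
theorem ports_common (fc : List (Int × Int)) (h : Int × Int) (t : List (Int × Int))
    (k : Int × Int) (hfm : pvFirstMin (h :: t) = some k) (hkfc : k ∈ fc) :
    ∃ idx : Nat, idx < fc.length ∧
      List.idxOf? k fc = some idx ∧
      get_sorted_boundary fc (h :: t) =
        PySem.List.slice (fc ++ fc) (some (idx : Int))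
          (some ((idx : Int) + ((fc.length : Int) - ((h :: t).length : Int) + 2))) ∧
      get_sorted_boundary_alt fc (h :: t) =
        pvCycTake (fc.drop idx ++ fc.take idx)
          ((fc.length : Int) - ((h :: t).length : Int) + 2) := by
  have hscan : (h :: t).foldl pvScanStep h = t.foldl pvScanStep h := by
    rw [List.foldl_cons, show pvScanStep h h = h by simp [pvScanStep]]
  have hk : k = t.foldl pvScanStep h := by
    have := pvFirstMin_eq_scan t h
    rw [hfm] at this
    exact Option.some_inj.mp this
  have hmem : t.foldl pvScanStep h ∈ fc := hk ▸ hkfc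
  obtain ⟨idx, hidx⟩ := Option.isSome_iff_exists.mp
    ((PySem.List.index?_isSome_iff fc _).mpr hmem)
  obtain ⟨pre, suf, hsplit, hlen, _⟩ := (PySem.List.index?_eq_some_iff _ _ _).mp hidx
  have hlt : idx < fc.length := by
    subst hsplit; simp [← hlen]
  refine ⟨idx, hlt, ?_, ?_, ?_⟩
  · rw [← PySem.List.index?_eq_idxOf?, hk]; exact hidx
  · rw [get_sorted_boundary, PySem.List.pyGet?_zero_cons]
    simp only [hscan, hidx]
    congr 1
    ring_nf
  · rw [get_sorted_boundary_alt]
    simp only [sorted_head, hidx]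
    rw [PySem.List.slice_from _ (by positivity), PySem.List.slice_to _ (by positivity)]
    simp

-- negative count without wrap overlap: A's slice is empty
theorem slice_eq_nil (fc : List (Int × Int)) (idx : Nat) (c : Int)
    (hidx : idx < fc.length) (hc : c < 0)
    (hnw : ¬((idx : Int) + c < 0 ∧ 0 < 2 * (fc.length : Int) + c)) :
    PySem.List.slice (fc ++ fc) (some (idx : Int)) (some ((idx : Int) + c)) = [] := by
  simp only [PySem.List.slice, PySem.List.clampIdx, List.length_append]
  rw [List.take_eq_nil_iff]
  left
  split_ifs <;> omega

-- ===== VERDICT (by name: the statement is the Claim_ definition above) =====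
theorem get_sorted_boundary_spec : Claim_unchanged_get_sorted_boundary := by
  intro fc ip _ hpre hnD
  obtain ⟨k, hkip, hfm, hkfc⟩ := hpre
  cases ip with
  | nil => cases hkip
  | cons h t =>
    obtain ⟨idx, hlt, hidxOf, hA, hB⟩ := ports_common fc h t k hfm hkfc
    rw [hA, hB]
    set c : Int := (fc.length : Int) - ((h :: t).length : Int) + 2 with hc
    by_cases hcs : 0 ≤ c
    · rw [show c = ((c.toNat : Nat) : Int) by omega]
      exact cyc_eq_slice fc idx c.toNat hlt (by simp [hc] at *; omega)
    · rw [slice_eq_nil fc idx c hlt (by omega) ?hnw]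
      · rw [pvCycTake, show c.toNat = 0 by omega, pvCycTakeGo_succ, if_pos (by omega)]
      · intro ⟨hw1, hw2⟩
        refine hnD ⟨?_, ?_⟩
        · rw [hfm]
          simp only [Option.bind_some, hidxOf, Option.getD_some]
          simp only [hc, List.length_cons] at hw1 ⊢; push_cast at hw1 ⊢; omega
        · simp only [hc, List.length_cons] at hw2 ⊢; push_cast at hw2 ⊢; omega

theorem get_sorted_boundary_changed : Claim_changed_get_sorted_boundary := by
  unfold Claim_changed_get_sorted_boundary; decide

theorem get_sorted_boundary_tight : Claim_exact_get_sorted_boundary := by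
  intro fc ip _ hpre hD
  obtain ⟨k, hkip, hfm, hkfc⟩ := hpre
  obtain ⟨hw1, hw2⟩ := hD
  cases ip with
  | nil => cases hkip
  | cons h t =>
    obtain ⟨idx, hlt, hidxOf, hA, hB⟩ := ports_common fc h t k hfm hkfc
    rw [hA, hB]
    set c : Int := (fc.length : Int) - ((h :: t).length : Int) + 2 with hc
    rw [hfm] at hw1
    simp only [Option.bind_some, hidxOf, Option.getD_some] at hw1
    have hcneg : c < 0 := by simp only [hc]; omega
    intro heq
    rw [pvCycTake, show c.toNat = 0 by omega, pvCycTakeGo_succ, if_pos (by omega)] at heq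
    have hlen := congrArg List.length heq
    rw [PySem.List.length_slice] at hlen
    simp only [List.length_append, List.length_nil] at hlen
    rw [show PySem.List.clampIdx (fc.length + fc.length) ((idx : Int) + c)
          = (2 * (fc.length : Int) + idx + c).toNat by
        simp only [PySem.List.clampIdx]
        split_ifs <;> omega] at hlen
    rw [show PySem.List.clampIdx (fc.length + fc.length) (idx : Int) = idx by
        simp only [PySem.List.clampIdx]
        split_ifs <;> omega] at hlen
    omega
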